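-- pv_equiv track=rewrite | github.com/jmiah120/MiahNum | MiahNum.py | _tup_add
-- ===== SOURCE A (Python) =====
-- def _tup_add(tup1, tup2):
--     "Adds two tuples the vector way"
--     arg1 = len(tup1)
--     arg2 = len(tup2)
--     if arg1 != arg2:
--         tup1 += (0,)*(max(arg1,arg2)-min(arg1,arg2))
--         tup2 += (0,)*(max(arg1,arg2)-min(arg1,arg2))
--     args = tuple(i+j for i,j in zip(tup1,tup2))
--     return args
-- ===== SOURCE B (Python) =====
-- def _tup_add(tup1, tup2):
--     "Adds two tuples the vector way"
--     out = []
--     i = 0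
--     while i < len(tup1) and i < len(tup2):
--         out.append(tup1[i] + tup2[i])
--         i += 1
--     out.extend(tup1[i:])
--     out.extend(tup2[i:])
--     return tuple(out)
-- ===== Notes on version B (the rewrite author's own statement) =====
-- stated objective: alternative
-- what changed: B sums only the common prefix in a while loop and then appends the leftover suffix of the longer tuple unchanged, instead of zero-padding both tuples to equal length and zipping them.
import Mathlib
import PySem

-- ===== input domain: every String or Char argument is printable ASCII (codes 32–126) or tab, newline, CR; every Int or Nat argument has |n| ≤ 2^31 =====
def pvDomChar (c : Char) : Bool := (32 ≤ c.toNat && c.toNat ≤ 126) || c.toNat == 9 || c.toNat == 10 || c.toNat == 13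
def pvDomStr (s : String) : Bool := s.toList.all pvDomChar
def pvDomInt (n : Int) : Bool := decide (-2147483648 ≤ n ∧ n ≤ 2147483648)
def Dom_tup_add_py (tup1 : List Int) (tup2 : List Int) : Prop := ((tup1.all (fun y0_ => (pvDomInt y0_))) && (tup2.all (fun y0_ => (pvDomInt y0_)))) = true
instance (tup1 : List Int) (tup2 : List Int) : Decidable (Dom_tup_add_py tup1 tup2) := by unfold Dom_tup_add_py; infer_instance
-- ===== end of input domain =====

-- B sums only the common prefix in a loop and then appends the longer tuple's leftover
-- suffix unchanged, instead of zero-padding both tuples and zipping (objective: alternative).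

-- ===== PORT A =====
def tup_add_py (tup1 : List Int) (tup2 : List Int) : List Int :=
  let arg1 := tup1.length
  let arg2 := tup2.length
  if arg1 ≠ arg2 then
    let t1 := tup1 ++ List.replicate (max arg1 arg2 - min arg1 arg2) (0 : Int)
    let t2 := tup2 ++ List.replicate (max arg1 arg2 - min arg1 arg2) (0 : Int)
    (t1.zip t2).map (fun p => p.1 + p.2)
  else
    (tup1.zip tup2).map (fun p => p.1 + p.2)

-- ===== PORT B =====
-- the while loop: state (i, out); runs while i is below both lengths
def tup_add_loop (t1 t2 : List Int) (i : Nat) (out : List Int) : Nat × List Int :=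
  if i < t1.length ∧ i < t2.length then
    tup_add_loop t1 t2 (i + 1) (out ++ [t1.getD i 0 + t2.getD i 0])
  else (i, out)
termination_by t1.length - i

def tup_add_py_alt (tup1 : List Int) (tup2 : List Int) : List Int :=
  let r := tup_add_loop tup1 tup2 0 []
  -- out.extend(tup1[i:]); out.extend(tup2[i:])  (slices with nonnegative i = drop)
  r.2 ++ tup1.drop r.1 ++ tup2.drop r.1

-- ===== PRECONDITION & SPEC =====
def Spec_tup_add_py (tup1 : List Int) (tup2 : List Int) (out : List Int) : Prop := out = tup_add_py_alt tup1 tup2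
instance (tup1 : List Int) (tup2 : List Int) (out : List Int) : Decidable (Spec_tup_add_py tup1 tup2 out) := by unfold Spec_tup_add_py; infer_instance

-- ===== CLAIM (what is proved, stated in full; the proofs are below) =====
def Claim_equal_tup_add_py : Prop := ∀ (tup1 : List Int) (tup2 : List Int), Dom_tup_add_py tup1 tup2 → Spec_tup_add_py tup1 tup2 (tup_add_py tup1 tup2)

-- ===== LEMMAS AND PROOFS =====

theorem loop_spec (t1 t2 : List Int) : ∀ (k i : ℕ) (out : List Int),
    i + k = min t1.length t2.length →
    tup_add_loop t1 t2 i out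
      = (min t1.length t2.length,
         out ++ (List.range' i k).map (fun j => t1.getD j 0 + t2.getD j 0)) := by
  intro k
  induction k with
  | zero =>
    intro i out hi
    rw [tup_add_loop]
    rw [if_neg (by omega)]
    simp; omega
  | succ k ih =>
    intro i out hi
    rw [tup_add_loop, if_pos (by omega)]
    rw [ih (i + 1) _ (by omega)]
    simp [List.range'_succ]

theorem alt_eq (t1 t2 : List Int) :
    tup_add_py_alt t1 t2
      = (List.range' 0 (min t1.length t2.length)).map (fun j => t1.getD j 0 + t2.getD j 0)
        ++ t1.drop (min t1.length t2.length) ++ t2.drop (min t1.length t2.length) := by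
  unfold tup_add_py_alt
  rw [loop_spec t1 t2 (min t1.length t2.length) 0 [] (by omega)]
  simp

-- element i of B's result equals the guarded elementwise sum
theorem alt_getElem (t1 t2 : List Int) (i : ℕ) (h : i < (tup_add_py_alt t1 t2).length) :
    (tup_add_py_alt t1 t2)[i]
      = (if i < t1.length then t1.getD i 0 else 0)
      + (if i < t2.length then t2.getD i 0 else 0) := by
  simp only [alt_eq] at h ⊢
  by_cases h1 : i < min t1.length t2.length
  · rw [List.getElem_append_left (by simp; omega), List.getElem_append_left (by simp; omega)]
    simp only [List.getElem_map, List.getElem_range']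
    rw [if_pos (by omega), if_pos (by omega)]
    simp
  · by_cases h2 : t1.length ≤ t2.length
    · -- t1 is the shorter: only t2's suffix remains
      have hm : min t1.length t2.length = t1.length := by omega
      simp only [hm] at h ⊢
      simp only [List.drop_length, List.append_nil] at h ⊢
      rw [List.getElem_append_right (by simp; omega)]
      simp only [List.length_map, List.length_range', List.getElem_drop]
      simp only [show t1.length + (i - t1.length) = i from by omega]
      rw [if_neg (by omega), if_pos (by simp at h; omega), zero_add,
          List.getD_eq_getElem t2 0 (by simp at h; omega)]
    · -- t2 is the shorter: only t1's suffix remains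
      have hm : min t1.length t2.length = t2.length := by omega
      simp only [hm] at h ⊢
      simp only [List.drop_length] at h ⊢
      rw [List.getElem_append_left (by simp at h ⊢; omega),
          List.getElem_append_right (by simp; omega)]
      simp only [List.length_map, List.length_range', List.getElem_drop]
      simp only [show t2.length + (i - t2.length) = i from by omega]
      rw [if_pos (by simp at h; omega), if_neg (by omega), add_zero,
          List.getD_eq_getElem t1 0 (by simp at h; omega)]

theorem alt_length (t1 t2 : List Int) :
    (tup_add_py_alt t1 t2).length = max t1.length t2.length := by
  rw [alt_eq]; simp; omega

-- padded lookup equals the guarded lookup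
theorem pad_getElem (l : List Int) (p i : ℕ) (h : i < l.length + p) :
    (l ++ List.replicate p (0 : Int))[i]'(by simp; omega)
      = (if i < l.length then l.getD i 0 else 0) := by
  by_cases hi : i < l.length
  · simp [List.getElem_append_left hi, hi]
  · rw [List.getElem_append_right (by omega)]
    simp [hi]

theorem tup_add_eq (l1 l2 : List Int) : tup_add_py l1 l2 = tup_add_py_alt l1 l2 := by
  unfold tup_add_py
  by_cases h : l1.length = l2.length
  · simp only [h, ne_eq, not_true_eq_false, if_false]
    apply List.ext_getElem
    · simp [alt_length]; omega
    · intro i h1 h2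
      simp only [List.length_map, List.length_zip] at h1
      rw [alt_getElem l1 l2 i h2]
      simp only [List.getElem_map, List.getElem_zip]
      rw [if_pos (by omega), if_pos (by omega),
          List.getD_eq_getElem l1 0 (by omega), List.getD_eq_getElem l2 0 (by omega)]
  · simp only [ne_eq, h, not_false_eq_true, if_true]
    apply List.ext_getElem
    · simp only [List.length_map, List.length_zip, List.length_append,
        List.length_replicate, alt_length]
      omega
    · intro i h1 h2
      simp only [List.length_map, List.length_zip, List.length_append,
        List.length_replicate] at h1
      rw [alt_getElem l1 l2 i h2]
      simp only [List.getElem_map, List.getElem_zip]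
      rw [pad_getElem l1 _ i (by omega), pad_getElem l2 _ i (by omega)]

-- ===== VERDICT (by name: the statement is the Claim_ definition above) =====
theorem tup_add_py_spec : Claim_equal_tup_add_py := by
  intro t1 t2 _
  unfold Spec_tup_add_py
  exact tup_add_eq t1 t2
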